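-- pv_equiv track=rewrite | github.com/edmundcheng221/CSCI-003 | Homework 7/animal_functions.py | get_most_urgent
-- ===== SOURCE A (Python) =====
-- def get_most_urgent(animals):
--     urgent = []
--     urgency = 0
--     for i in animals:
--         if i[2] > urgency:
--             urgency = i[2]
--             urgent.append(i)
--         else:
--             continue
--     return urgent[-1]
-- ===== SOURCE B (Python) =====
-- def get_most_urgent(animals):
--     m = max(a[2] for a in animals)
--     return next(a for a in animals if a[2] == m)
-- ===== Notes on version B (the rewrite author's own statement) =====
-- stated objective: idiomatic
-- what changed: Replaces A's incremental prefix-max scan that appends every new maximum to a list and returns the last appended entry by the standard two-pass max-then-first-match: compute the maximum urgency, then return the first animal attaining it.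
import Mathlib
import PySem

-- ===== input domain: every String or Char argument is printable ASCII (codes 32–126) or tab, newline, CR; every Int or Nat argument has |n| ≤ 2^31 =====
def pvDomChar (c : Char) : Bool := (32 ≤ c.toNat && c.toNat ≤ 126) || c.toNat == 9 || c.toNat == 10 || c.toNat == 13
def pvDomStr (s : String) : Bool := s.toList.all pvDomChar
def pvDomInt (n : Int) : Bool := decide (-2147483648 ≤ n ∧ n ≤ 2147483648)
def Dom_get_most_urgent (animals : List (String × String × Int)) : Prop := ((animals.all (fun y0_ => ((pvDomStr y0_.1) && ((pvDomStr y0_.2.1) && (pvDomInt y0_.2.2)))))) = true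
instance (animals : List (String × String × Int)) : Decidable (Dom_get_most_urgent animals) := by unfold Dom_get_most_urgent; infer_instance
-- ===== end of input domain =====

-- B replaces A's incremental prefix-max scan (append each new running maximum, return the
-- last appended entry) by the idiomatic two-pass max-then-first-match.

-- ===== PORT A =====
def get_most_urgent (animals : List (String × String × Int)) : String × String × Int :=
  (PySem.List.pyGet?
    (animals.foldl
      (fun (s : List (String × String × Int) × Int) i =>
        if s.2 < i.2.2 then (s.1 ++ [i], i.2.2) else s) ([], 0)).1
    (-1)).getD ("", "", 0)   -- urgent[-1]; none = IndexError, excluded by Pre_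

-- ===== PORT B =====
def get_most_urgent_alt (animals : List (String × String × Int)) : String × String × Int :=
  match PySem.List.max? (animals.map (fun a => a.2.2)) (fun x => x) with
  | none => ("", "", 0)      -- max() of empty: ValueError, excluded by Pre_
  | some m => (animals.find? (fun a => a.2.2 == m)).getD ("", "", 0)  -- next(...); unreachable default

-- ===== PRECONDITION & SPEC =====
-- A raises IndexError unless some animal has urgency > 0 (its running maximum starts at 0).
def Pre_get_most_urgent (animals : List (String × String × Int)) : Prop :=
  ∃ a ∈ animals, 0 < a.2.2
instance (animals : List (String × String × Int)) : Decidable (Pre_get_most_urgent animals) := by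
  unfold Pre_get_most_urgent; infer_instance
def pvWitness_get_most_urgent : (List (String × String × Int)) := [("cat", "limp", 3)]

def Spec_get_most_urgent (animals : List (String × String × Int)) (out : String × String × Int) : Prop := out = get_most_urgent_alt animals
instance (animals : List (String × String × Int)) (out : String × String × Int) : Decidable (Spec_get_most_urgent animals out) := by unfold Spec_get_most_urgent; infer_instance

-- ===== CLAIM (what is proved, stated in full; the proofs are below) =====
def Claim_equal_get_most_urgent : Prop := ∀ (animals : List (String × String × Int)), Dom_get_most_urgent animals → Pre_get_most_urgent animals → Spec_get_most_urgent animals (get_most_urgent animals)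

-- ===== LEMMAS AND PROOFS =====

-- abbreviations for A's loop step and the running max, used only in the proofs
def pvStepA (s : List (String × String × Int) × Int) (i : String × String × Int) :
    List (String × String × Int) × Int :=
  if s.2 < i.2.2 then (s.1 ++ [i], i.2.2) else s

def pvMaxv (l : List (String × String × Int)) (c : Int) : Int :=
  l.foldl (fun m a => max m a.2.2) c

theorem pvMaxv_cons (x : String × String × Int) (t : List (String × String × Int)) (c : Int) :
    pvMaxv (x :: t) c = pvMaxv t (max c x.2.2) := rfl

theorem le_pvMaxv (l : List (String × String × Int)) (c : Int) : c ≤ pvMaxv l c := by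
  induction l generalizing c with
  | nil => simp [pvMaxv]
  | cons x t ih =>
    rw [pvMaxv_cons]
    exact le_trans (le_max_left _ _) (ih _)

theorem mem_le_pvMaxv (l : List (String × String × Int)) (c : Int)
    (a : String × String × Int) (h : a ∈ l) : a.2.2 ≤ pvMaxv l c := by
  induction l generalizing c with
  | nil => cases h
  | cons x t ih =>
    rw [pvMaxv_cons]
    rcases List.mem_cons.mp h with rfl | h
    · exact le_trans (le_max_right _ _) (le_pvMaxv _ _)
    · exact ih _ h

theorem pvMaxv_max_init (l : List (String × String × Int)) (c v : Int) :
    pvMaxv l (max c v) = max c (pvMaxv l v) := by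
  induction l generalizing v with
  | nil => simp [pvMaxv]
  | cons x t ih =>
    rw [pvMaxv_cons, pvMaxv_cons, max_assoc, ih]

theorem pvStepA_all_le (l : List (String × String × Int))
    (u : List (String × String × Int)) (c : Int) (h : ∀ a ∈ l, a.2.2 ≤ c) :
    l.foldl pvStepA (u, c) = (u, c) := by
  induction l generalizing u with
  | nil => rfl
  | cons x t ih =>
    have hx : ¬ c < x.2.2 := not_lt.mpr (h x (by simp))
    simp only [List.foldl_cons, pvStepA, hx, if_false]
    exact ih u (fun a ha => h a (List.mem_cons_of_mem _ ha))

theorem pvMaxv_all_le (l : List (String × String × Int)) (c : Int)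
    (h : ∀ a ∈ l, a.2.2 ≤ c) : pvMaxv l c = c := by
  induction l with
  | nil => rfl
  | cons x t ih =>
    rw [pvMaxv_cons, max_eq_left (h x (by simp))]
    exact ih (fun a ha => h a (List.mem_cons_of_mem _ ha))

-- main invariant: the last element A appends is the first element attaining the overall max
theorem pvMainA (l : List (String × String × Int)) (u : List (String × String × Int)) (c : Int)
    (h : ∃ a ∈ l, c < a.2.2) :
    (l.foldl pvStepA (u, c)).1.getLast? = l.find? (fun a => a.2.2 == pvMaxv l c) := by
  induction l generalizing u c with
  | nil => rcases h with ⟨a, ha, _⟩; cases ha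
  | cons x t ih =>
    simp only [List.foldl_cons, pvStepA, pvMaxv_cons]
    by_cases hx : c < x.2.2
    · simp only [hx, if_true]
      rw [max_eq_right hx.le]
      by_cases ht : ∃ a ∈ t, x.2.2 < a.2.2
      · rw [ih (u ++ [x]) x.2.2 ht]
        have hmax : x.2.2 < pvMaxv t x.2.2 := by
          rcases ht with ⟨a, ha, hlt⟩
          exact lt_of_lt_of_le hlt (mem_le_pvMaxv t x.2.2 a ha)
        rw [List.find?_cons]
        have : (x.2.2 == pvMaxv t x.2.2) = false := by
          simp [ne_of_lt hmax]
        rw [this]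
      · have ht' : ∀ a ∈ t, a.2.2 ≤ x.2.2 := by
          intro a ha
          by_contra hgt
          exact ht ⟨a, ha, not_le.mp hgt⟩
        rw [pvStepA_all_le t (u ++ [x]) x.2.2 ht', pvMaxv_all_le t x.2.2 ht']
        simp
    · simp only [hx, if_false]
      have hle : x.2.2 ≤ c := not_lt.mp hx
      rw [max_eq_left hle]
      have ht : ∃ a ∈ t, c < a.2.2 := by
        rcases h with ⟨a, ha, hlt⟩
        rcases List.mem_cons.mp ha with rfl | ha
        · exact absurd hlt hx
        · exact ⟨a, ha, hlt⟩
      rw [ih u c ht]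
      have hmax : x.2.2 < pvMaxv t c := by
        rcases ht with ⟨a, ha, hlt⟩
        exact lt_of_le_of_lt hle (lt_of_lt_of_le hlt (mem_le_pvMaxv t c a ha))
      rw [List.find?_cons]
      have : (x.2.2 == pvMaxv t c) = false := by simp [ne_of_lt hmax]
      rw [this]

theorem get_most_urgent_spec : Claim_equal_get_most_urgent := by
  intro animals _ hpre
  unfold Spec_get_most_urgent get_most_urgent get_most_urgent_alt
  rcases hpre with ⟨w, hw, hwpos⟩
  obtain ⟨x, t, rfl⟩ : ∃ x t, animals = x :: t := by
    cases animals with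
    | nil => cases hw
    | cons x t => exact ⟨x, t, rfl⟩
  -- B's maximum: max? over the mapped values equals pvMaxv (x :: t) 0
  have hmap : (x :: t).map (fun a => a.2.2) = x.2.2 :: t.map (fun a => a.2.2) := rfl
  rw [hmap, PySem.List.max?_id_cons]
  have hfold : (t.map (fun a => a.2.2)).foldl max x.2.2 = pvMaxv t x.2.2 := by
    rw [List.foldl_map]; rfl
  have hm : pvMaxv (x :: t) 0 = pvMaxv t x.2.2 := by
    have hpos : 0 < pvMaxv t x.2.2 := by
      rcases List.mem_cons.mp hw with rfl | hw'
      · exact lt_of_lt_of_le hwpos (le_pvMaxv t _)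
      · exact lt_of_lt_of_le hwpos (mem_le_pvMaxv t _ w hw')
    rw [pvMaxv_cons, pvMaxv_max_init]
    omega
  -- A's loop via the invariant
  have hlast := pvMainA (x :: t) [] 0 ⟨w, hw, hwpos⟩
  have hstep : (x :: t).foldl
      (fun (s : List (String × String × Int) × Int) i =>
        if s.2 < i.2.2 then (s.1 ++ [i], i.2.2) else s) ([], 0)
      = (x :: t).foldl pvStepA ([], 0) := rfl
  rw [hstep, PySem.List.pyGet?_neg_one, hlast, hfold, ← hm]
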